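-- pv_equiv track=rewrite | github.com/ysy9997/algorithm | Baekjoon/2343.py | bi
-- ===== SOURCE A (Python) =====
-- def video_list(videos, m, _max):
--     total = [0 for _ in range(m)]
--     p = 0
--     for i in videos:
--         if total[p] + i <= _max:
--             total[p] = total[p] + i
--         else:
--             p = p + 1
--             if p >= m or i > _max:
--                 return False
--             total[p] = total[p] + i
--     return True
--
-- def bi(videos, m, start, end):
--     if end - start < 2:
--         if video_list(videos, m, start):
--             return start
--         elif video_list(videos, m, start + 1):
--             return start + 1
--         else:
--             return start + 2
--
--     mid = (start + end) // 2
--     if video_list(videos, m, mid):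
--         return bi(videos, m, start, mid)
--     else:
--         return bi(videos, m, mid, end)
-- ===== SOURCE B (Python) =====
-- def _fits(videos, m, cap):
--     # greedy: count pieces needed with per-piece capacity `cap`, O(1) extra space
--     cur = 0
--     pieces = 1
--     for v in videos:
--         if cur + v <= cap:
--             cur += v
--         else:
--             pieces += 1
--             if pieces > m or v > cap:
--                 return False
--             cur = v
--     return True
--
-- def bi(videos, m, start, end):
--     while end - start >= 2:
--         mid = (start + end) // 2
--         if _fits(videos, m, mid):
--             end = mid
--         else:
--             start = mid
--     if _fits(videos, m, start):
--         return start
--     if _fits(videos, m, start + 1):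
--         return start + 1
--     return start + 2
-- ===== Notes on version B (the rewrite author's own statement) =====
-- stated objective: faster
-- what changed: The feasibility check keeps only a running piece-sum and a piece counter instead of allocating and indexing a length-m total list, and the binary search is an iterative while-loop narrowing [start,end) with the three-way base case applied once after the loop, instead of A's recursion with the base case inside.
import Mathlib
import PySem

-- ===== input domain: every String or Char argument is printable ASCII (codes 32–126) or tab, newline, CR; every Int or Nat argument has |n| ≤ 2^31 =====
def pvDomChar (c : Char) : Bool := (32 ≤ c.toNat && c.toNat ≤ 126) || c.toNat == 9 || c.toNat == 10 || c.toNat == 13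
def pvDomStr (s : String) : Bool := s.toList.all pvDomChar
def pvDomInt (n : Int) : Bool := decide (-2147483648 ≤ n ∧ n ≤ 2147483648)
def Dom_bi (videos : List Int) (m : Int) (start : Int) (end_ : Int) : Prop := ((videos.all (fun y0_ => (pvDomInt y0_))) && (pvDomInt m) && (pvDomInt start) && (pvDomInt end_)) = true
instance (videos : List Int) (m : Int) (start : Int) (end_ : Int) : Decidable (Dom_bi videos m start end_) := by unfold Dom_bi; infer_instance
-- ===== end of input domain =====

-- B replaces the O(m) total-list feasibility check by an O(1)-space running-sum/piece-counter
-- check and the recursion by an iterative interval-narrowing loop; return values agree wherever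
-- A returns (A raises IndexError when m ≤ 0 with nonempty videos — excluded by Pre_bi).

-- ===== PORT A =====
-- A's video_list: total = [0]*m, p an index into it; `none` = IndexError (total[p] out of range).
def videoLoopA (m _max : Int) : List Int → List Int → Nat → Option Bool
  | [], _, _ => some true
  | i :: rest, total, p =>
    match PySem.List.pyGet? total (p : Int) with
    | none => none
    | some tp =>
      if tp + i ≤ _max then
        videoLoopA m _max rest (total.set p (tp + i)) p
      else
        let p' := p + 1
        if ((p' : Int) ≥ m) ∨ i > _max then some false
        else
          match PySem.List.pyGet? total (p' : Int) with
          | none => none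
          | some tp' => videoLoopA m _max rest (total.set p' (tp' + i)) p'

def videoListA (videos : List Int) (m _max : Int) : Option Bool :=
  videoLoopA m _max videos (List.replicate m.toNat 0) 0

-- A's bi; where video_list would raise (videoListA = none, i.e. m ≤ 0 and videos ≠ []) we
-- return 0 — those inputs are excluded by Pre_bi, nothing is claimed there.
def bi (videos : List Int) (m : Int) (start : Int) (end_ : Int) : Int :=
  if _h : end_ - start < 2 then
    match videoListA videos m start with
    | none => 0
    | some true => start
    | some false =>
      match videoListA videos m (start + 1) with
      | none => 0
      | some true => start + 1
      | some false => start + 2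
  else
    match videoListA videos m (PySem.Int.floordiv (start + end_) 2) with
    | none => 0
    | some true => bi videos m start (PySem.Int.floordiv (start + end_) 2)
    | some false => bi videos m (PySem.Int.floordiv (start + end_) 2) end_
termination_by (end_ - start).toNat
decreasing_by
  all_goals
    rw [PySem.Int.floordiv_eq_ediv_of_pos (show (0:Int) < 2 by omega)]
    omega

-- ===== PORT B =====
-- B's _fits: running sum `cur` of the current piece, 1-based piece counter.
def fitsLoop (m cap : Int) : List Int → Int → Int → Bool
  | [], _, _ => true
  | v :: rest, cur, pieces =>
    if cur + v ≤ cap then fitsLoop m cap rest (cur + v) pieces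
    else
      let pieces' := pieces + 1
      if pieces' > m ∨ v > cap then false
      else fitsLoop m cap rest v pieces'

def fits (videos : List Int) (m cap : Int) : Bool :=
  fitsLoop m cap videos 0 1

-- B's while-loop: narrow [start, end) until end - start < 2, return the final pair.
def biLoop (videos : List Int) (m : Int) (start : Int) (end_ : Int) : Int × Int :=
  if _h : end_ - start < 2 then (start, end_)
  else if fits videos m (PySem.Int.floordiv (start + end_) 2) then
    biLoop videos m start (PySem.Int.floordiv (start + end_) 2)
  else biLoop videos m (PySem.Int.floordiv (start + end_) 2) end_
termination_by (end_ - start).toNat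
decreasing_by
  all_goals
    rw [PySem.Int.floordiv_eq_ediv_of_pos (show (0:Int) < 2 by omega)]
    omega

def bi_alt (videos : List Int) (m : Int) (start : Int) (end_ : Int) : Int :=
  let s := (biLoop videos m start end_).1
  if fits videos m s then s
  else if fits videos m (s + 1) then s + 1
  else s + 2

-- ===== PRECONDITION & SPEC =====
-- A's video_list indexes total[0] of the empty list total = [0]*m whenever m ≤ 0 and videos is
-- nonempty (IndexError); Pre_bi excludes exactly those inputs.
def Pre_bi (videos : List Int) (m : Int) (start : Int) (end_ : Int) : Prop :=
  0 < m ∨ videos = []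
instance (videos : List Int) (m : Int) (start : Int) (end_ : Int) : Decidable (Pre_bi videos m start end_) := by unfold Pre_bi; infer_instance

def pvWitness_bi : List Int × Int × Int × Int := ([9, 7, 2, 4], 2, 0, 22)

def Spec_bi (videos : List Int) (m : Int) (start : Int) (end_ : Int) (out : Int) : Prop := out = bi_alt videos m start end_
instance (videos : List Int) (m : Int) (start : Int) (end_ : Int) (out : Int) : Decidable (Spec_bi videos m start end_ out) := by unfold Spec_bi; infer_instance

-- ===== CLAIM (what is proved, stated in full; the proofs are below) =====
def Claim_equal_bi : Prop := ∀ (videos : List Int) (m : Int) (start : Int) (end_ : Int), Dom_bi videos m start end_ → Pre_bi videos m start end_ → Spec_bi videos m start end_ (bi videos m start end_)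

-- ===== LEMMAS AND PROOFS =====

-- Invariant tying A's total-list state to B's (cur, pieces) state:
-- total has length m.toNat, p < length, total[p] = cur, entries after p are still 0,
-- and pieces = p + 1.
theorem videoLoopA_eq_fitsLoop (m _max : Int) (rest : List Int) :
    ∀ (total : List Int) (p : Nat) (cur : Int),
      total.length = m.toNat → p < total.length →
      total[p]? = some cur → (∀ j, p < j → (hj : j < total.length) → total[j] = 0) →
      videoLoopA m _max rest total p = some (fitsLoop m _max rest cur ((p : Int) + 1)) := by
  induction rest with
  | nil => intro total p cur _ _ _ _; simp [videoLoopA, fitsLoop]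
  | cons i rest ih =>
    intro total p cur hlen hp hget hzero
    have hp' : PySem.List.pyGet? total (p : Int) = some cur := by
      rw [PySem.List.pyGet?_natCast]; exact hget
    rw [videoLoopA, fitsLoop, hp']
    by_cases hle : cur + i ≤ _max
    · simp only [hle, if_pos]
      have := ih (total.set p (cur + i)) p (cur + i)
        (by simpa using hlen) (by simpa using hp)
        (by simp [hp])
        (by intro j hj hjl
            rw [List.getElem_set]
            simp only [List.length_set] at hjl
            rw [if_neg (by omega)]
            exact hzero j hj (by simpa using hjl))
      simpa using this
    · simp only [hle, if_neg, not_false_iff]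
      by_cases hfail : ((p : Int) + 1 ≥ m) ∨ i > _max
      · have hfail' : (p : Int) + 1 + 1 > m ∨ i > _max := by omega
        simp [hfail]
      · have hfail' : ¬ ((p : Int) + 1 + 1 > m ∨ i > _max) := by omega
        have hplt : p + 1 < total.length := by
          rw [hlen]; omega
        have hgetp1 : PySem.List.pyGet? total ((p : Int) + 1) = some total[p+1] := by
          rw [show ((p : Int) + 1) = ((p + 1 : Nat) : Int) by push_cast; ring,
            PySem.List.pyGet?_natCast]
          simp [List.getElem?_eq_getElem hplt]
        have hz : total[p+1] = 0 := hzero (p+1) (by omega) hplt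
        simp only [hfail', if_neg, not_false_iff]
        push_cast
        rw [hgetp1, hz]
        have := ih (total.set (p+1) (0 + i)) (p+1) i
          (by simpa using hlen) (by simpa using hplt)
          (by simp [hplt])
          (by intro j hj hjl
              rw [List.getElem_set]
              simp only [List.length_set] at hjl
              rw [if_neg (by omega)]
              exact hzero j (by omega) (by simpa using hjl))
        push_cast at this
        have hcond : ¬ (m ≤ (p:Int) + 1 ∨ _max < i) := by omega
        simpa [hcond] using this

theorem videoListA_eq_fits (videos : List Int) (m cap : Int)
    (hpre : 0 < m ∨ videos = []) :
    videoListA videos m cap = some (fits videos m cap) := by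
  rcases hpre with hm | hnil
  · have hlen : (List.replicate m.toNat (0:Int)).length = m.toNat := by simp
    have := videoLoopA_eq_fitsLoop m cap videos (List.replicate m.toNat 0) 0 0
      hlen (by simp; omega) (by simp [List.getElem?_replicate]; omega)
      (by intro j _ hj; simp)
    simpa [videoListA, fits] using this
  · subst hnil; simp [videoListA, videoLoopA, fits, fitsLoop]

-- A's recursion equals B's loop followed by the base case, under Pre_.
theorem bi_eq_alt (videos : List Int) (m : Int) (hpre : 0 < m ∨ videos = []) :
    ∀ (start end_ : Int), bi videos m start end_ = bi_alt videos m start end_ := by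
  intro start end_
  induction hfuel : (end_ - start).toNat using Nat.strong_induction_on generalizing start end_ with
  | _ n ih =>
  by_cases h : end_ - start < 2
  · have hloop : biLoop videos m start end_ = (start, end_) := by
      rw [biLoop, dif_pos h]
    rw [bi, dif_pos h, videoListA_eq_fits videos m start hpre,
      videoListA_eq_fits videos m (start + 1) hpre]
    unfold bi_alt
    rw [hloop]
    cases hf : fits videos m start <;> cases hf1 : fits videos m (start + 1) <;> simp [hf, hf1]
  · rw [bi, dif_neg h, videoListA_eq_fits videos m _ hpre]
    have hmid : PySem.Int.floordiv (start + end_) 2 = (start + end_) / 2 :=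
      PySem.Int.floordiv_eq_ediv_of_pos (by omega)
    cases hf : fits videos m (PySem.Int.floordiv (start + end_) 2) with
    | true =>
      have halt : bi_alt videos m start end_
          = bi_alt videos m start (PySem.Int.floordiv (start + end_) 2) := by
        unfold bi_alt; rw [biLoop, dif_neg h, if_pos hf]
      rw [halt]
      exact ih ((PySem.Int.floordiv (start + end_) 2 - start).toNat)
        (by rw [hmid]; omega) _ _ rfl
    | false =>
      have halt : bi_alt videos m start end_
          = bi_alt videos m (PySem.Int.floordiv (start + end_) 2) end_ := by
        unfold bi_alt
        rw [biLoop, dif_neg h]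
        simp only [hf, Bool.false_eq_true, if_false]
      rw [halt]
      exact ih ((end_ - PySem.Int.floordiv (start + end_) 2).toNat)
        (by rw [hmid]; omega) _ _ rfl

-- ===== VERDICT (by name: the statement is the Claim_ definition above) =====
theorem bi_spec : Claim_equal_bi := by
  intro videos m start end_ _ hpre
  unfold Spec_bi Pre_bi at *
  exact bi_eq_alt videos m hpre start end_
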